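-- pv_equiv track=rewrite | github.com/Rye123/fabulaautoma | lib/core/parsers.py | parse_accuracy_string
-- ===== SOURCE A (Python) =====
-- def parse_accuracy_string(accuracy: str) -> str:
--     """
--     Parses the accuracy string, returning a deterministic, formatted string.
--
--     Example:
--         ```
--         parse_accuracy_string("MIG+MIG+2+4")   # returns "【MIG+MIG】+6"
--         ```
--     """
--
--     ACCEPTED_KEYWORDS = ["DEX", "INS", "MIG", "WLP"]
--
--     i = 0
--     attribs = []
--     bonus = 0
--     while i < len(accuracy):
--         match accuracy[i]:
--             case '(' | '[' | '【' | '{':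
--                 i += 1
--             case ')' | ']' | '】' | '}':
--                 i += 1
--             case ' ' | '\t':
--                 i += 1
--             case '+':  #TODO: I'm assuming there's no negatives here
--                 i += 1
--             case _:
--                 if accuracy[i].isdigit():
--                     # Parse until not a digit anymore
--                     j = i + 1
--                     while j < len(accuracy) and accuracy[j].isdigit():
--                         j += 1
--
--                     # Invariant: j is now end of string OR pointing to a non-digit
--                     number = int(accuracy[i:j])
--                     bonus += number
--                     i = j
--                 elif accuracy[i].isalpha():
--                     # Parse until we get a full keyword (only alphabetical chars)
--                     j = i + 1
--                     while j < len(accuracy) and accuracy[j].isalpha():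
--                         j += 1
--
--                     # Invariant: j is now end of string OR pointing to a non-character
--                     keyword = accuracy[i:j]
--                     found = False
--                     for test_keyword in ACCEPTED_KEYWORDS:
--                         if test_keyword == keyword:
--                             found = True
--
--                     if not found:
--                         raise ValueError(f"parse_accuracy_string: Invalid keyword {keyword}")
--                     attribs.append(keyword)
--                     i = j
--                 else:
--                     raise ValueError(f"parse_accuracy_string: Unexpected character {accuracy[i]}")
--
--     # Construct result string
--     res_accuracy = ""
--     attribs = sorted(attribs)  # Ensure sorted order of attributes -- they're in alphabetical order, what a fortunate coincidence!
--     if len(attribs) != 0: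
--         res_accuracy += "【" + "+".join(attribs) + "】"
--     if bonus != 0:
--         res_accuracy += f"+{bonus}"
--
--     return res_accuracy
-- ===== SOURCE B (Python) =====
-- from itertools import groupby
--
-- _SEPARATORS = set(" \t+()[]{}【】")
-- _ACCEPTED_KEYWORDS = {"DEX", "INS", "MIG", "WLP"}
--
--
-- def _char_class(c: str) -> str:
--     if c.isdigit():
--         return 'd'
--     if c.isalpha():
--         return 'a'
--     if c in _SEPARATORS:
--         return 's'
--     return '?'
--
--
-- def parse_accuracy_string(accuracy: str) -> str:
--     attribs = []
--     bonus = 0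
--     for cls, group in groupby(accuracy, key=_char_class):
--         text = ''.join(group)
--         if cls == 'd':
--             bonus += int(text)
--         elif cls == 'a':
--             if text not in _ACCEPTED_KEYWORDS:
--                 raise ValueError(f"parse_accuracy_string: Invalid keyword {text}")
--             attribs.append(text)
--         elif cls == 's':
--             pass
--         else:
--             raise ValueError(f"parse_accuracy_string: Unexpected character {text[0]}")
--
--     res = ""
--     if attribs:
--         res += "【" + "+".join(sorted(attribs)) + "】"
--     if bonus:
--         res += f"+{bonus}"
--     return res
-- ===== Notes on version B (the rewrite author's own statement) =====
-- stated objective: alternative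
-- what changed: B replaces A's manual index-walking nested while-loops with an itertools.groupby pass over character classes (digit/alpha/separator), processing each maximal run as one token; the formatting step is unchanged.
import Mathlib
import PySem

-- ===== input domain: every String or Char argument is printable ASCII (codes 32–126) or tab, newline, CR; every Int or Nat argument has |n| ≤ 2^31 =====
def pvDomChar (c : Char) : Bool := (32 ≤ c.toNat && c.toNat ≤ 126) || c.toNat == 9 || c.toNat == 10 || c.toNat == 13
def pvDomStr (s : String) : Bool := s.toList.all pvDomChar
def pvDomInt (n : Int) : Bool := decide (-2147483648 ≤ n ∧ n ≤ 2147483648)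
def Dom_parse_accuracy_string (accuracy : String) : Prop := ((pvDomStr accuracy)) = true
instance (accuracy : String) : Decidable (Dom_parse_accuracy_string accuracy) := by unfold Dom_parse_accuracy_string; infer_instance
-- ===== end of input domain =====

-- B replaces A's manual index-walking while-loops by a groupby pass over character classes;
-- equivalence of the two ports is proved unconditionally, Pre_ marks where the Pythons raise ValueError.

def pvKeywords : List String := ["DEX", "INS", "MIG", "WLP"]

-- ===== PORT A =====
-- A's match arms for separators, as the boolean chain the match tests
def pvIsSepA (c : Char) : Bool :=
  c == '(' || c == '[' || c == '【' || c == '{' ||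
  c == ')' || c == ']' || c == '】' || c == '}' ||
  c == ' ' || c == '\t' || c == '+'

-- the while-loop of A: index walking over the remaining characters; the inner
-- digit/alpha scans (while j ...; accuracy[i:j]) are the takeWhile/dropWhile of the rest.
-- int(accuracy[i:j]) is exact here: the slice is a nonempty ASCII digit run, so ofChars? = some.
-- 'none' is A's ValueError (invalid keyword / unexpected character).
def pvGoA : List Char → List String → Int → Option (List String × Int)
  | [], attribs, bonus => some (attribs, bonus)
  | c :: rest, attribs, bonus =>
    if pvIsSepA c then pvGoA rest attribs bonus
    else if PySem.Chars.isdigit c then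
      let ds := rest.takeWhile PySem.Chars.isdigit
      let number := (PySem.Int.ofChars? (c :: ds)).getD 0
      pvGoA (rest.dropWhile PySem.Chars.isdigit) attribs (bonus + number)
    else if PySem.Chars.isalpha c then
      let ks := rest.takeWhile PySem.Chars.isalpha
      let kw := String.mk (c :: ks)
      let found := pvKeywords.foldl (fun f t => f || t == kw) false
      if found then pvGoA (rest.dropWhile PySem.Chars.isalpha) (attribs ++ [kw]) bonus
      else none
    else none
termination_by l => l.length
decreasing_by
  · simp
  · exact Nat.lt_succ_of_le (List.length_dropWhile_le _ _)
  · exact Nat.lt_succ_of_le (List.length_dropWhile_le _ _)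

-- A's result construction
def pvFormatA (attribs : List String) (bonus : Int) : String :=
  let attribs2 := PySem.List.sorted attribs (fun x => x) false
  let res1 := if attribs2.length ≠ 0 then "【" ++ PySem.Str.join "+" attribs2 ++ "】" else ""
  if bonus ≠ 0 then res1 ++ "+" ++ PySem.Int.toStr bonus else res1

def parse_accuracy_string (accuracy : String) : String :=
  match pvGoA accuracy.toList [] 0 with
  | some (attribs, bonus) => pvFormatA attribs bonus
  | none => ""   -- unreachable under Pre_: Python raises ValueError here

-- ===== PORT B =====
def pvSepChars : List Char := [' ', '\t', '+', '(', ')', '[', ']', '{', '}', '【', '】']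

-- _char_class, with 'd'/'a'/'s'/'?' encoded as 0/1/2/3
def pvClassOf (c : Char) : Nat :=
  if PySem.Chars.isdigit c then 0
  else if PySem.Chars.isalpha c then 1
  else if pvSepChars.contains c then 2
  else 3

-- itertools.groupby(accuracy, key=_char_class): maximal runs of equal class
def pvChunks : List Char → List (List Char)
  | [] => []
  | c :: rest =>
    (c :: rest.takeWhile (fun d => pvClassOf d == pvClassOf c)) ::
      pvChunks (rest.dropWhile (fun d => pvClassOf d == pvClassOf c))
termination_by l => l.length
decreasing_by
  exact Nat.lt_succ_of_le (List.length_dropWhile_le _ _)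

-- B's for-loop over the groups; 'none' is B's ValueError
def pvGoB : List (List Char) → List String → Int → Option (List String × Int)
  | [], attribs, bonus => some (attribs, bonus)
  | g :: gs, attribs, bonus =>
    let cls := pvClassOf (g.headD ' ')   -- groups of pvChunks are nonempty
    if cls == 0 then pvGoB gs attribs (bonus + (PySem.Int.ofChars? g).getD 0)
    else if cls == 1 then
      let kw := String.mk g
      if pvKeywords.contains kw then pvGoB gs (attribs ++ [kw]) bonus else none
    else if cls == 2 then pvGoB gs attribs bonus
    else none

-- B's result construction
def pvFormatB (attribs : List String) (bonus : Int) : String :=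
  let res1 := if attribs.length ≠ 0 then
      "【" ++ PySem.Str.join "+" (PySem.List.sorted attribs (fun x => x) false) ++ "】"
    else ""
  if bonus ≠ 0 then res1 ++ "+" ++ PySem.Int.toStr bonus else res1

def parse_accuracy_string_alt (accuracy : String) : String :=
  match pvGoB (pvChunks accuracy.toList) [] 0 with
  | some (attribs, bonus) => pvFormatB attribs bonus
  | none => ""   -- unreachable under Pre_: Python raises ValueError here

-- ===== PRECONDITION & SPEC =====
-- Pre_ excludes exactly the inputs where A raises ValueError: a character that is neither a
-- digit, a letter nor a separator, or a maximal alphabetic run that is not an accepted keyword.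
-- Closed form: every character is of an allowed kind, and at every index i that starts a
-- maximal alphabetic run, that run (the letters from i on) is one of the accepted keywords.
def Pre_parse_accuracy_string (accuracy : String) : Prop :=
  (accuracy.toList.all (fun c =>
      PySem.Chars.isdigit c || PySem.Chars.isalpha c || pvSepChars.contains c)) = true ∧
  ((List.range accuracy.toList.length).all (fun i =>
      !(PySem.Chars.isalpha (accuracy.toList.getD i ' ') &&
        (i == 0 || !PySem.Chars.isalpha (accuracy.toList.getD (i - 1) ' '))) ||
      pvKeywords.contains
        (String.mk ((accuracy.toList.drop i).takeWhile PySem.Chars.isalpha)))) = true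

instance (accuracy : String) : Decidable (Pre_parse_accuracy_string accuracy) := by
  unfold Pre_parse_accuracy_string; infer_instance

def pvWitness_parse_accuracy_string : String := "MIG+MIG+2+4"

def Spec_parse_accuracy_string (accuracy : String) (out : String) : Prop := out = parse_accuracy_string_alt accuracy
instance (accuracy : String) (out : String) : Decidable (Spec_parse_accuracy_string accuracy out) := by unfold Spec_parse_accuracy_string; infer_instance

-- ===== CLAIM (what is proved, stated in full; the proofs are below) =====
def Claim_equal_parse_accuracy_string : Prop := ∀ (accuracy : String), Dom_parse_accuracy_string accuracy → Pre_parse_accuracy_string accuracy → Spec_parse_accuracy_string accuracy (parse_accuracy_string accuracy)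

-- ===== LEMMAS AND PROOFS =====

theorem pvDigitNotAlpha (c : Char) (h : PySem.Chars.isdigit c = true) :
    PySem.Chars.isalpha c = false := by
  simp [PySem.Chars.isdigit, PySem.Chars.isalpha, PySem.Chars.isupper, PySem.Chars.islower,
        Char.le_def, UInt32.le_iff_toNat_le] at *
  omega

theorem pvSepContains (c : Char) : pvSepChars.contains c = pvIsSepA c := by
  rw [Bool.eq_iff_iff]
  simp [pvIsSepA, pvSepChars]
  tauto

theorem pvSepNotDigit (c : Char) (h : pvIsSepA c = true) : PySem.Chars.isdigit c = false := by
  simp [pvIsSepA] at h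
  rcases h with (((((((((rfl|rfl)|rfl)|rfl)|rfl)|rfl)|rfl)|rfl)|rfl)|rfl)|rfl <;> decide

theorem pvSepNotAlpha (c : Char) (h : pvIsSepA c = true) : PySem.Chars.isalpha c = false := by
  simp [pvIsSepA] at h
  rcases h with (((((((((rfl|rfl)|rfl)|rfl)|rfl)|rfl)|rfl)|rfl)|rfl)|rfl)|rfl <;> decide

theorem pvBeqZero (d : Char) : (pvClassOf d == 0) = PySem.Chars.isdigit d := by
  unfold pvClassOf
  split_ifs with h1 h2 h3 <;> simp_all

theorem pvBeqOne (d : Char) : (pvClassOf d == 1) = PySem.Chars.isalpha d := by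
  unfold pvClassOf
  split_ifs with h1 h2 h3 <;> simp_all [pvDigitNotAlpha]

theorem pvClassTwoSep (d : Char) (h : pvClassOf d = 2) : pvIsSepA d = true := by
  unfold pvClassOf at h
  split_ifs at h with h1 h2 h3
  all_goals first
  | omega
  | (rw [← pvSepContains]; exact h3)

theorem pvClassOfDigit (c : Char) (h : PySem.Chars.isdigit c = true) : pvClassOf c = 0 := by
  simp [pvClassOf, h]

theorem pvClassOfAlpha (c : Char) (h : PySem.Chars.isalpha c = true) : pvClassOf c = 1 := by
  have hd : PySem.Chars.isdigit c = false := by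
    cases e : PySem.Chars.isdigit c
    · rfl
    · rw [pvDigitNotAlpha c e] at h; exact absurd h (by simp)
  simp [pvClassOf, hd, h]

theorem pvClassOfSep (c : Char) (hd : PySem.Chars.isdigit c = false)
    (ha : PySem.Chars.isalpha c = false) (hs : pvIsSepA c = true) : pvClassOf c = 2 := by
  have hc : pvSepChars.contains c = true := by rw [pvSepContains]; exact hs
  unfold pvClassOf
  rw [hd, ha, hc]
  simp

theorem pvClassOfBad (c : Char) (hd : PySem.Chars.isdigit c = false)
    (ha : PySem.Chars.isalpha c = false) (hs : pvIsSepA c = false) : pvClassOf c = 3 := by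
  have hc : pvSepChars.contains c = false := by rw [pvSepContains]; exact hs
  unfold pvClassOf
  rw [hd, ha, hc]
  simp

theorem pvFoundEqContains (kw : String) :
    (pvKeywords.foldl (fun f t => f || t == kw) false) = pvKeywords.contains kw := by
  rw [Bool.eq_iff_iff]; simp [pvKeywords, List.foldl]; tauto

-- A consumes a run of separator characters one at a time, leaving the state unchanged
theorem pvGoASepRun (run : List Char) (hrun : ∀ x ∈ run, pvIsSepA x = true) :
    ∀ (t : List Char) (attribs : List String) (bonus : Int),
      pvGoA (run ++ t) attribs bonus = pvGoA t attribs bonus := by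
  induction run with
  | nil => intro t a b; rfl
  | cons x xs ih =>
    intro t a b
    rw [List.cons_append, pvGoA, if_pos (hrun x List.mem_cons_self)]
    exact ih (fun y hy => hrun y (List.mem_cons_of_mem _ hy)) t a b

theorem pvMainAux : ∀ (n : Nat) (l : List Char), l.length ≤ n →
    ∀ (attribs : List String) (bonus : Int),
      pvGoA l attribs bonus = pvGoB (pvChunks l) attribs bonus := by
  intro n
  induction n with
  | zero =>
    intro l hl
    have : l = [] := List.eq_nil_of_length_eq_zero (Nat.le_zero.mp hl)
    subst this
    intro a b; rw [pvGoA, pvChunks]; rfl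
  | succ n ih =>
    intro l hl attribs bonus
    match l with
    | [] => rw [pvGoA, pvChunks]; rfl
    | c :: rest =>
      have hrest : rest.length ≤ n := by simpa using hl
      rw [pvChunks]
      by_cases hd : PySem.Chars.isdigit c = true
      · -- digit run
        have hsep : pvIsSepA c = false := by
          cases e : pvIsSepA c
          · rfl
          · rw [pvSepNotDigit c e] at hd; exact absurd hd (by simp)
        have hpred : (fun d => pvClassOf d == pvClassOf c) = PySem.Chars.isdigit := by
          funext d; rw [pvClassOfDigit c hd]; exact pvBeqZero d
        rw [hpred, pvGoA, if_neg (by simp [hsep]), if_pos hd, pvGoB]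
        simp only [List.headD_cons, pvClassOfDigit c hd]
        exact ih _ (le_trans (List.length_dropWhile_le _ _) hrest) _ _
      · by_cases ha : PySem.Chars.isalpha c = true
        · -- alpha run (keyword)
          have hsep : pvIsSepA c = false := by
            cases e : pvIsSepA c
            · rfl
            · rw [pvSepNotAlpha c e] at ha; exact absurd ha (by simp)
          have hpred : (fun d => pvClassOf d == pvClassOf c) = PySem.Chars.isalpha := by
            funext d; rw [pvClassOfAlpha c ha]; exact pvBeqOne d
          rw [hpred, pvGoA, if_neg (by simp [hsep]), if_neg (by simp [hd]), if_pos ha, pvGoB]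
          simp only [List.headD_cons, pvClassOfAlpha c ha]
          conv_rhs => rw [if_neg (by decide), if_pos (by decide)]
          simp only [pvFoundEqContains]
          split_ifs with hfound
          · exact ih _ (le_trans (List.length_dropWhile_le _ _) hrest) _ _
          · rfl
        · by_cases hs : pvIsSepA c = true
          · -- separator run: A skips it one character at a time, B as one group
            have hcls : pvClassOf c = 2 :=
              pvClassOfSep c (by simpa using hd) (by simpa using ha) hs
            rw [pvGoA, if_pos hs, pvGoB]
            simp only [List.headD_cons, hcls]
            conv_rhs => rw [if_neg (by decide), if_neg (by decide), if_pos (by decide)]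
            have hsplit := List.takeWhile_append_dropWhile
              (p := fun d => pvClassOf d == 2) (l := rest)
            have hrun : ∀ x ∈ rest.takeWhile (fun d => pvClassOf d == 2),
                pvIsSepA x = true := by
              intro x hx
              have := List.mem_takeWhile_imp hx
              simp only [beq_iff_eq] at this
              exact pvClassTwoSep x this
            calc pvGoA rest attribs bonus
                = pvGoA (rest.takeWhile (fun d => pvClassOf d == 2) ++
                    rest.dropWhile (fun d => pvClassOf d == 2)) attribs bonus := by
                  rw [hsplit]
              _ = pvGoA (rest.dropWhile (fun d => pvClassOf d == 2)) attribs bonus :=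
                  pvGoASepRun _ hrun _ _ _
              _ = pvGoB (pvChunks (rest.dropWhile (fun d => pvClassOf d == 2)))
                    attribs bonus :=
                  ih _ (le_trans (List.length_dropWhile_le _ _) hrest) _ _
          · -- unexpected character: both raise
            have hcls : pvClassOf c = 3 :=
              pvClassOfBad c (by simpa using hd) (by simpa using ha) (by simpa using hs)
            rw [pvGoA, if_neg (by simp [hs]), if_neg (by simp [hd]), if_neg (by simp [ha]), pvGoB]
            simp [hcls]

theorem pvMain : ∀ (l : List Char) (attribs : List String) (bonus : Int),
    pvGoA l attribs bonus = pvGoB (pvChunks l) attribs bonus := fun l =>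
  pvMainAux l.length l le_rfl

-- ===== VERDICT (by name: the statement is the Claim_ definition above) =====
theorem parse_accuracy_string_spec : Claim_equal_parse_accuracy_string := by
  intro accuracy _ _
  unfold Spec_parse_accuracy_string parse_accuracy_string parse_accuracy_string_alt
  rw [pvMain]
  rcases h : pvGoB (pvChunks accuracy.toList) [] 0 with _ | ⟨a, b⟩
  · rfl
  · simp [pvFormatA, pvFormatB]
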